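-- pv_equiv track=rewrite | github.com/arunkhattri/HackerRank | Algorithm/queens_attack.py | max_diag_right_down
-- ===== SOURCE A (Python) =====
-- def max_diag_right_down(row, col, dim):
--     move_count = 0
--     up_lim = dim + 1
--     low_lim = 0
--     # diagonal right down moves
--     drd_i, drd_j = row - 1, col + 1
--     while drd_i > low_lim and drd_j < up_lim:
--         move_count += 1
--         drd_i -= 1
--         drd_j += 1
--     return move_count
-- ===== SOURCE B (Python) =====
-- def max_diag_right_down(row, col, dim):
--     # Closed form: steps limited by distance to top edge (row-1)
--     # and to right edge (dim-col); never negative.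
--     return max(0, min(row - 1, dim - col))
-- ===== Notes on version B (the rewrite author's own statement) =====
-- stated objective: faster
-- what changed: Replaced the step-by-step diagonal walk with the closed form max(0, min(row-1, dim-col)).
import Mathlib
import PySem

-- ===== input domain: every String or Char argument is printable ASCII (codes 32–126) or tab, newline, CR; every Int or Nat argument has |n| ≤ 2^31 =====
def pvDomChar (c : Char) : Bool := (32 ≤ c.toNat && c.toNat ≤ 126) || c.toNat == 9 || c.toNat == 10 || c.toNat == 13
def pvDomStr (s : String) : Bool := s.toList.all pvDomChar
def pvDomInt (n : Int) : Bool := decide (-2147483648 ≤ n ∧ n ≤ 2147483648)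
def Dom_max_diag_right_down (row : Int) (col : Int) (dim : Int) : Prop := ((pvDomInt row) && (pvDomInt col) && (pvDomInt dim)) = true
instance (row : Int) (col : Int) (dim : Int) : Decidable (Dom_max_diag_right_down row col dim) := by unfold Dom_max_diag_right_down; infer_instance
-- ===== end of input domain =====

-- B replaces A's step-by-step diagonal walk with the closed form max(0, min(row-1, dim-col)); objective: faster.

-- ===== PORT A =====
-- literal port of A's while loop: state (drd_i, drd_j, move_count); low_lim = 0, up_lim = dim + 1
def pvLoopA (up_lim : Int) (i j cnt : Int) : Int :=
  if h : i > 0 ∧ j < up_lim then pvLoopA up_lim (i - 1) (j + 1) (cnt + 1) else cnt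
  termination_by i.toNat
  decreasing_by
    have : 0 < i := h.1
    omega

def max_diag_right_down (row : Int) (col : Int) (dim : Int) : Int :=
  pvLoopA (dim + 1) (row - 1) (col + 1) 0

-- ===== PORT B =====
def max_diag_right_down_alt (row : Int) (col : Int) (dim : Int) : Int :=
  max 0 (min (row - 1) (dim - col))

-- ===== PRECONDITION & SPEC =====
def Spec_max_diag_right_down (row : Int) (col : Int) (dim : Int) (out : Int) : Prop := out = max_diag_right_down_alt row col dim
instance (row : Int) (col : Int) (dim : Int) (out : Int) : Decidable (Spec_max_diag_right_down row col dim out) := by unfold Spec_max_diag_right_down; infer_instance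

-- ===== CLAIM (what is proved, stated in full; the proofs are below) =====
def Claim_equal_max_diag_right_down : Prop := ∀ (row : Int) (col : Int) (dim : Int), Dom_max_diag_right_down row col dim → Spec_max_diag_right_down row col dim (max_diag_right_down row col dim)

-- ===== LEMMAS AND PROOFS =====
theorem pvLoopA_closed (up_lim : Int) : ∀ (n : Nat) (i j cnt : Int), i.toNat = n →
    pvLoopA up_lim i j cnt = cnt + max 0 (min i (up_lim - j)) := by
  intro n
  induction n with
  | zero =>
      intro i j cnt hn
      rw [pvLoopA]
      have hi : i ≤ 0 := by omega
      split_ifs with h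
      · omega
      · omega
  | succ m ih =>
      intro i j cnt hn
      rw [pvLoopA]
      split_ifs with h
      · rw [ih (i - 1) (j + 1) (cnt + 1) (by omega)]
        omega
      · omega

-- ===== VERDICT (by name: the statement is the Claim_ definition above) =====
theorem max_diag_right_down_spec : Claim_equal_max_diag_right_down := by
  intro row col dim _
  unfold Spec_max_diag_right_down max_diag_right_down max_diag_right_down_alt
  rw [pvLoopA_closed (dim + 1) (row - 1).toNat (row - 1) (col + 1) 0 rfl]
  omega
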